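-- pv_equiv track=rewrite | github.com/RFD-FHEM/PySignalduino | tools/generate_sitemap.py | get_changefreq_for_path
-- ===== SOURCE A (Python) =====
-- CHANGEFREQ_MAP = {
--     'index.html': 'monthly',
--     'user-guide/installation.html': 'yearly',
--     'user-guide/usage.html': 'yearly',
--     'user-guide/index.html': 'yearly',
--     'developer-guide/architecture.html': 'yearly',
--     'developer-guide/contribution.html': 'yearly',
--     'developer-guide/index.html': 'yearly',
--     'protocol-reference/protocol-details.html': 'monthly',
--     'protocol-reference/index.html': 'monthly',
--     'examples/': 'yearly',
--     'examples/bash/': 'yearly',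
--     'migration/': 'never',
--     'devcontainer-environment.html': 'yearly',
--     'agents.html': 'monthly',
--     'changelog.html': 'weekly',
--     'readme.html': 'monthly',
-- }
--
-- def get_changefreq_for_path(file_path: str) -> str:
--     """Bestimme die Update-Frequenz für einen gegebenen Dateipfad."""
--     normalized = file_path.replace('\\', '/')
--
--     for pattern, changefreq in CHANGEFREQ_MAP.items():
--         if pattern.endswith('/'):
--             if normalized.startswith(pattern):
--                 return changefreq
--         elif normalized == pattern:
--             return changefreq
--
--     # Fallback
--     if normalized.startswith('examples/'):
--         return 'yearly'
--     elif normalized.startswith('migration/'):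
--         return 'never'
--     elif normalized.startswith('developer-guide/'):
--         return 'yearly'
--     elif normalized.startswith('user-guide/'):
--         return 'yearly'
--     elif normalized.startswith('protocol-reference/'):
--         return 'monthly'
--     else:
--         return 'yearly'
-- ===== SOURCE B (Python) =====
-- _EXACT = {
--     'index.html': 'monthly',
--     'user-guide/installation.html': 'yearly',
--     'user-guide/usage.html': 'yearly',
--     'user-guide/index.html': 'yearly',
--     'developer-guide/architecture.html': 'yearly',
--     'developer-guide/contribution.html': 'yearly',
--     'developer-guide/index.html': 'yearly',
--     'protocol-reference/protocol-details.html': 'monthly',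
--     'protocol-reference/index.html': 'monthly',
--     'devcontainer-environment.html': 'yearly',
--     'agents.html': 'monthly',
--     'changelog.html': 'weekly',
--     'readme.html': 'monthly',
-- }
--
-- _PREFIXES = [
--     ('examples/', 'yearly'),
--     ('migration/', 'never'),
--     ('developer-guide/', 'yearly'),
--     ('user-guide/', 'yearly'),
--     ('protocol-reference/', 'monthly'),
-- ]
--
-- def get_changefreq_for_path(file_path: str) -> str:
--     normalized = file_path.replace('\\', '/')
--     freq = _EXACT.get(normalized)
--     if freq is not None:
--         return freq
--     for prefix, f in _PREFIXES:
--         if normalized.startswith(prefix):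
--             return f
--     return 'yearly'
-- ===== Notes on version B (the rewrite author's own statement) =====
-- stated objective: simpler
-- what changed: A's single loop over the mixed map (branching per key on whether the key is a directory prefix) plus a duplicated fallback if-chain is replaced by an exact-match dict lookup followed by one ordered scan of (prefix, freq) pairs with a single default.
import Mathlib
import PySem

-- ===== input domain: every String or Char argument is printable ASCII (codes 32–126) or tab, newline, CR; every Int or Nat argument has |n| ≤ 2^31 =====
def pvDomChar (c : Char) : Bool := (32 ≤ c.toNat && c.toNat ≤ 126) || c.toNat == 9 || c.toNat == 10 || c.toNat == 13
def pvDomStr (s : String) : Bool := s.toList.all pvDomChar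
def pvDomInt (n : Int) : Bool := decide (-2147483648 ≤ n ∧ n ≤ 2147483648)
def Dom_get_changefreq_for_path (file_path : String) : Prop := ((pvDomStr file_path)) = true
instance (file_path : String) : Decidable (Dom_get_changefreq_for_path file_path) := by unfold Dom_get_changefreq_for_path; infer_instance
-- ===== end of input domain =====

-- B replaces A's single loop (with its duplicated fallback chain) by an exact-match dict
-- lookup followed by one ordered prefix scan; objective: simpler, same cost.

-- ===== PORT A =====
-- CHANGEFREQ_MAP.items() in insertion order
def pvChangefreqMap : List (String × String) :=
  [("index.html", "monthly"),
   ("user-guide/installation.html", "yearly"),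
   ("user-guide/usage.html", "yearly"),
   ("user-guide/index.html", "yearly"),
   ("developer-guide/architecture.html", "yearly"),
   ("developer-guide/contribution.html", "yearly"),
   ("developer-guide/index.html", "yearly"),
   ("protocol-reference/protocol-details.html", "monthly"),
   ("protocol-reference/index.html", "monthly"),
   ("examples/", "yearly"),
   ("examples/bash/", "yearly"),
   ("migration/", "never"),
   ("devcontainer-environment.html", "yearly"),
   ("agents.html", "monthly"),
   ("changelog.html", "weekly"),
   ("readme.html", "monthly")]

-- the 'for pattern, changefreq in CHANGEFREQ_MAP.items()' loop with early return
def pvALoop (normalized : String) : List (String × String) → Option String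
  | [] => none
  | (pattern, changefreq) :: rest =>
    if PySem.Str.endswith pattern "/" then
      if PySem.Str.startswith normalized pattern then some changefreq
      else pvALoop normalized rest
    else if normalized == pattern then some changefreq
    else pvALoop normalized rest

def get_changefreq_for_path (file_path : String) : String :=
  let normalized := PySem.Str.replace file_path "\\" "/"
  match pvALoop normalized pvChangefreqMap with
  | some changefreq => changefreq
  | none =>
    if PySem.Str.startswith normalized "examples/" then "yearly"
    else if PySem.Str.startswith normalized "migration/" then "never"
    else if PySem.Str.startswith normalized "developer-guide/" then "yearly"
    else if PySem.Str.startswith normalized "user-guide/" then "yearly"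
    else if PySem.Str.startswith normalized "protocol-reference/" then "monthly"
    else "yearly"

-- ===== PORT B =====
def pvExact : PySem.Dict String String :=
  PySem.Dict.ofList
    [("index.html", "monthly"),
     ("user-guide/installation.html", "yearly"),
     ("user-guide/usage.html", "yearly"),
     ("user-guide/index.html", "yearly"),
     ("developer-guide/architecture.html", "yearly"),
     ("developer-guide/contribution.html", "yearly"),
     ("developer-guide/index.html", "yearly"),
     ("protocol-reference/protocol-details.html", "monthly"),
     ("protocol-reference/index.html", "monthly"),
     ("devcontainer-environment.html", "yearly"),
     ("agents.html", "monthly"),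
     ("changelog.html", "weekly"),
     ("readme.html", "monthly")]

def pvPrefixes : List (String × String) :=
  [("examples/", "yearly"),
   ("migration/", "never"),
   ("developer-guide/", "yearly"),
   ("user-guide/", "yearly"),
   ("protocol-reference/", "monthly")]

def pvBScan (normalized : String) : List (String × String) → String
  | [] => "yearly"
  | (prefix_, f) :: rest =>
    if PySem.Str.startswith normalized prefix_ then f else pvBScan normalized rest

def get_changefreq_for_path_alt (file_path : String) : String :=
  let normalized := PySem.Str.replace file_path "\\" "/"
  match pvExact.get? normalized with
  | some freq => freq
  | none => pvBScan normalized pvPrefixes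

-- ===== PRECONDITION & SPEC =====
def Spec_get_changefreq_for_path (file_path : String) (out : String) : Prop := out = get_changefreq_for_path_alt file_path
instance (file_path : String) (out : String) : Decidable (Spec_get_changefreq_for_path file_path out) := by unfold Spec_get_changefreq_for_path; infer_instance

-- ===== CLAIM (what is proved, stated in full; the proofs are below) =====
def Claim_equal_get_changefreq_for_path : Prop := ∀ (file_path : String), Dom_get_changefreq_for_path file_path → Spec_get_changefreq_for_path file_path (get_changefreq_for_path file_path)

-- ===== LEMMAS AND PROOFS =====
theorem pv_bash (n : String) :
    PySem.Str.startswith n "examples/" = false →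
    PySem.Str.startswith n "examples/bash/" = false := by
  intro h
  by_contra hb
  rw [Bool.not_eq_false] at hb
  apply absurd _ (h ▸ Bool.false_ne_true)
  rw [PySem.Str.startswith_eq] at hb ⊢
  rw [PySem.Chars.startswith_iff] at hb ⊢
  exact List.IsPrefix.trans (by decide) hb

set_option maxHeartbeats 1000000 in
theorem pv_core (n : String) :
    (match pvALoop n pvChangefreqMap with
     | some changefreq => changefreq
     | none =>
       if PySem.Str.startswith n "examples/" then "yearly"
       else if PySem.Str.startswith n "migration/" then "never"
       else if PySem.Str.startswith n "developer-guide/" then "yearly"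
       else if PySem.Str.startswith n "user-guide/" then "yearly"
       else if PySem.Str.startswith n "protocol-reference/" then "monthly"
       else "yearly")
    = (match pvExact.get? n with
       | some freq => freq
       | none => pvBScan n pvPrefixes) := by
  by_cases h1 : n = "index.html"
  · subst h1; rfl
  by_cases h2 : n = "user-guide/installation.html"
  · subst h2; rfl
  by_cases h3 : n = "user-guide/usage.html"
  · subst h3; rfl
  by_cases h4 : n = "user-guide/index.html"
  · subst h4; rfl
  by_cases h5 : n = "developer-guide/architecture.html"
  · subst h5; rfl
  by_cases h6 : n = "developer-guide/contribution.html"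
  · subst h6; rfl
  by_cases h7 : n = "developer-guide/index.html"
  · subst h7; rfl
  by_cases h8 : n = "protocol-reference/protocol-details.html"
  · subst h8; rfl
  by_cases h9 : n = "protocol-reference/index.html"
  · subst h9; rfl
  by_cases h10 : n = "devcontainer-environment.html"
  · subst h10; rfl
  by_cases h11 : n = "agents.html"
  · subst h11; rfl
  by_cases h12 : n = "changelog.html"
  · subst h12; rfl
  by_cases h13 : n = "readme.html"
  · subst h13; rfl
  have hmk : pvExact = PySem.Dict.mk
    [("index.html", "monthly"),
     ("user-guide/installation.html", "yearly"),
     ("user-guide/usage.html", "yearly"),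
     ("user-guide/index.html", "yearly"),
     ("developer-guide/architecture.html", "yearly"),
     ("developer-guide/contribution.html", "yearly"),
     ("developer-guide/index.html", "yearly"),
     ("protocol-reference/protocol-details.html", "monthly"),
     ("protocol-reference/index.html", "monthly"),
     ("devcontainer-environment.html", "yearly"),
     ("agents.html", "monthly"),
     ("changelog.html", "weekly"),
     ("readme.html", "monthly")] := by rfl
  rw [hmk]
  simp only [pvALoop, pvChangefreqMap, pvPrefixes, pvBScan, PySem.Dict.get?_mk_cons,
    (beq_eq_false_iff_ne.mpr h1),
    (beq_eq_false_iff_ne.mpr (Ne.symm h1)),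
    (beq_eq_false_iff_ne.mpr h2),
    (beq_eq_false_iff_ne.mpr (Ne.symm h2)),
    (beq_eq_false_iff_ne.mpr h3),
    (beq_eq_false_iff_ne.mpr (Ne.symm h3)),
    (beq_eq_false_iff_ne.mpr h4),
    (beq_eq_false_iff_ne.mpr (Ne.symm h4)),
    (beq_eq_false_iff_ne.mpr h5),
    (beq_eq_false_iff_ne.mpr (Ne.symm h5)),
    (beq_eq_false_iff_ne.mpr h6),
    (beq_eq_false_iff_ne.mpr (Ne.symm h6)),
    (beq_eq_false_iff_ne.mpr h7),
    (beq_eq_false_iff_ne.mpr (Ne.symm h7)),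
    (beq_eq_false_iff_ne.mpr h8),
    (beq_eq_false_iff_ne.mpr (Ne.symm h8)),
    (beq_eq_false_iff_ne.mpr h9),
    (beq_eq_false_iff_ne.mpr (Ne.symm h9)),
    (beq_eq_false_iff_ne.mpr h10),
    (beq_eq_false_iff_ne.mpr (Ne.symm h10)),
    (beq_eq_false_iff_ne.mpr h11),
    (beq_eq_false_iff_ne.mpr (Ne.symm h11)),
    (beq_eq_false_iff_ne.mpr h12),
    (beq_eq_false_iff_ne.mpr (Ne.symm h12)),
    (beq_eq_false_iff_ne.mpr h13),
    (beq_eq_false_iff_ne.mpr (Ne.symm h13)),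
    (show PySem.Str.endswith "index.html" "/" = false by decide),
    (show PySem.Str.endswith "user-guide/installation.html" "/" = false by decide),
    (show PySem.Str.endswith "user-guide/usage.html" "/" = false by decide),
    (show PySem.Str.endswith "user-guide/index.html" "/" = false by decide),
    (show PySem.Str.endswith "developer-guide/architecture.html" "/" = false by decide),
    (show PySem.Str.endswith "developer-guide/contribution.html" "/" = false by decide),
    (show PySem.Str.endswith "developer-guide/index.html" "/" = false by decide),
    (show PySem.Str.endswith "protocol-reference/protocol-details.html" "/" = false by decide),
    (show PySem.Str.endswith "protocol-reference/index.html" "/" = false by decide),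
    (show PySem.Str.endswith "examples/" "/" = true by decide),
    (show PySem.Str.endswith "examples/bash/" "/" = true by decide),
    (show PySem.Str.endswith "migration/" "/" = true by decide),
    (show PySem.Str.endswith "devcontainer-environment.html" "/" = false by decide),
    (show PySem.Str.endswith "agents.html" "/" = false by decide),
    (show PySem.Str.endswith "changelog.html" "/" = false by decide),
    (show PySem.Str.endswith "readme.html" "/" = false by decide),
    Bool.false_eq_true, if_false, if_true]
  split_ifs with hex hbash
  case _ => rfl
  all_goals try rfl
  all_goals (rw [pv_bash n (Bool.not_eq_true _ ▸ hex)] at hbash; exact absurd hbash Bool.false_ne_true)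

-- ===== VERDICT (by name: the statement is the Claim_ definition above) =====
theorem get_changefreq_for_path_spec : Claim_equal_get_changefreq_for_path := by
  intro fp _
  unfold Spec_get_changefreq_for_path get_changefreq_for_path get_changefreq_for_path_alt
  exact pv_core _
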